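-- pv_equiv track=rewrite | github.com/mimoo/better-ocaml | ocaml_parser.py | split_errors
-- ===== SOURCE A (Python) =====
-- def split_errors(compiler_output):
--     # split errors from the compiler output
--     # (each error starts with `File "`
--     in_error = False
--     errors = []
--     current_error = []
--
--     for line in compiler_output:
--         # new error
--         if line.startswith('File "') and in_error:
--             errors.append(current_error)
--             current_error = []
--
--         # bad start
--         if not in_error:
--             if line[:6] != 'File "':
--                 raise "Error: expected 'File' at start of line"
--             in_error = True
--
--         # just add to the current error
--         current_error.append(line)
--
--     # last error pending
--     errors.append(current_error)
--
--     # return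
--     return errors
-- ===== SOURCE B (Python) =====
-- def split_errors(compiler_output):
--     # Validate once, then scan in reverse: each group is closed exactly when
--     # its own 'File "' first line is reached, building the output back-to-front.
--     lines = list(compiler_output)
--     if lines and not lines[0].startswith('File "'):
--         raise ValueError("expected 'File' at start of line")
--     groups = []
--     current = []
--     for line in reversed(lines):
--         current.insert(0, line)
--         if line.startswith('File "'):
--             groups.insert(0, current)
--             current = []
--     return groups
-- ===== Notes on version B (the rewrite author's own statement) =====
-- stated objective: alternative
-- what changed: B replaces A's left-to-right scan with an in_error flag (flushing the pending group when the NEXT boundary is seen) by a single reversed pass that closes each group exactly when its own 'File "' first line is reached, building the output back-to-front, with the first-line validation hoisted out of the loop.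
-- intended difference: On the empty input A returns [[]] (it unconditionally appends the never-started pending group, a leftover of its loop state), while B returns [], the intended 'no errors' result. — e.g. on split_errors([]): A returns [[]], B returns []
import Mathlib
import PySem

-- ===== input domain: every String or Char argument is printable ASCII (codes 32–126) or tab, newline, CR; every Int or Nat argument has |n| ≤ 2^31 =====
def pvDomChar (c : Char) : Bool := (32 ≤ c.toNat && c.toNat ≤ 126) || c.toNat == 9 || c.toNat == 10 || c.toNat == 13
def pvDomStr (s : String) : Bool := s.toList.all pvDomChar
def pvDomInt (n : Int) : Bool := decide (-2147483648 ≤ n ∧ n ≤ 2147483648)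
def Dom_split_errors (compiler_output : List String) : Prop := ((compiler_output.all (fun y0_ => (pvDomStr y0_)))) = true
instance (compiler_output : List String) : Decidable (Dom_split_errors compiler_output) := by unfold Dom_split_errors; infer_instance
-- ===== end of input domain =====

-- B closes each group at its own 'File "' first line in one reversed pass (validation
-- hoisted); equal to A everywhere except the empty input, stated as an intended difference.

-- line.startswith('File "')
def isFileLine (line : String) : Bool := PySem.Str.startswith line "File \""

-- ===== PORT A =====
-- loop state: some (in_error, errors, current_error); none = the Python raise happened
def splitStep (st : Option (Bool × List (List String) × List String)) (line : String) :
    Option (Bool × List (List String) × List String) :=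
  match st with
  | none => none
  | some (in_error, errors, current_error) =>
    -- new error
    let p := if isFileLine line && in_error then
               (errors ++ [current_error], ([] : List String))
             else (errors, current_error)
    -- bad start
    if !in_error then
      if PySem.Str.slice line none (some 6) ≠ "File \"" then none  -- Python: raise
      else some (true, p.1, p.2 ++ [line])
    else some (true, p.1, p.2 ++ [line])

def split_errors (compiler_output : List String) : List (List String) :=
  match compiler_output.foldl splitStep (some (false, [], [])) with
  | none => []  -- the Python raises here (excluded by Pre_)
  | some (_, errors, current_error) => errors ++ [current_error]

-- ===== PORT B =====
def altStep (line : String) (st : List (List String) × List String) :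
    List (List String) × List String :=
  let current := line :: st.2
  if isFileLine line then (current :: st.1, ([] : List String))
  else (st.1, current)

def split_errors_alt (compiler_output : List String) : List (List String) :=
  let lines := compiler_output
  if lines ≠ [] ∧ ¬ (isFileLine lines.headI = true) then []
    -- the Python raises here (excluded by Pre_)
  else (lines.foldr altStep ([], [])).1

-- ===== PRECONDITION & SPEC =====
-- Pre_ excludes exactly the inputs on which A raises (a TypeError, from its string raise
-- statement): a non-empty input whose first line does not start with 'File "'.
def Pre_split_errors (compiler_output : List String) : Prop :=
  ((compiler_output.take 1).all isFileLine) = true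
instance (compiler_output : List String) : Decidable (Pre_split_errors compiler_output) := by
  unfold Pre_split_errors; infer_instance

def pvWitness_split_errors : List String :=
  ["File \"a.ml\", line 1:", "Error: Unbound value x", "File \"b.ml\", line 2:", "Error: oops"]

-- On the empty input A returns [[]] (it unconditionally appends the never-started pending
-- group, leftover loop state), while B returns [], the intended 'no errors' result.
def D_split_errors (compiler_output : List String) : Prop := compiler_output = []
instance (compiler_output : List String) : Decidable (D_split_errors compiler_output) := by
  unfold D_split_errors; infer_instance

def Spec_split_errors (compiler_output : List String) (out : List (List String)) : Prop :=
  ¬ D_split_errors compiler_output → out = split_errors_alt compiler_output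
instance (compiler_output : List String) (out : List (List String)) :
    Decidable (Spec_split_errors compiler_output out) := by
  unfold Spec_split_errors; infer_instance

def pvDiffWitness_split_errors : List String := []
def pvDiffWitnessOut_split_errors : (List (List String)) × (List (List String)) := ([[]], [])

-- ===== CLAIM (what is proved, stated in full; the proofs are below) =====
def Claim_unchanged_split_errors : Prop := ∀ (compiler_output : List String), Dom_split_errors compiler_output → Pre_split_errors compiler_output → Spec_split_errors compiler_output (split_errors compiler_output)
def Claim_changed_split_errors : Prop := Dom_split_errors (pvDiffWitness_split_errors) ∧ Pre_split_errors (pvDiffWitness_split_errors) ∧ D_split_errors (pvDiffWitness_split_errors) ∧ split_errors (pvDiffWitness_split_errors) = pvDiffWitnessOut_split_errors.1 ∧ split_errors_alt (pvDiffWitness_split_errors) = pvDiffWitnessOut_split_errors.2 ∧ pvDiffWitnessOut_split_errors.1 ≠ pvDiffWitnessOut_split_errors.2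
def Claim_exact_split_errors : Prop := ∀ (compiler_output : List String), Dom_split_errors compiler_output → Pre_split_errors compiler_output → D_split_errors compiler_output → split_errors compiler_output ≠ split_errors_alt compiler_output

-- ===== LEMMAS AND PROOFS =====

-- the common grouping specification: chunks cur t finishes the open chunk cur through t
def chunks (cur : List String) : List String → List (List String)
  | [] => [cur]
  | l :: t => if isFileLine l then cur :: chunks [l] t else chunks (cur ++ [l]) t

-- the groups after the first chunk
def restGroups (t : List String) : List (List String) :=
  match t.dropWhile (fun l => !isFileLine l) with
  | [] => []
  | y :: u => chunks [y] u

theorem chunks_span (t : List String) : ∀ cur,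
    chunks cur t = (cur ++ t.takeWhile (fun l => !isFileLine l)) :: restGroups t := by
  induction t with
  | nil => intro cur; simp [chunks, restGroups]
  | cons l t ih =>
    intro cur
    by_cases h : isFileLine l = true
    · simp [chunks, restGroups, h]
    · rw [Bool.not_eq_true] at h
      simp [chunks, restGroups, h, ih]

theorem foldA (t : List String) : ∀ errors cur,
    (match t.foldl splitStep (some (true, errors, cur)) with
     | none => ([] : List (List String))
     | some (_, e, c) => e ++ [c]) = errors ++ chunks cur t := by
  induction t with
  | nil => intro errors cur; simp [chunks]
  | cons l t ih =>
    intro errors cur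
    by_cases h : isFileLine l = true
    · simp [List.foldl_cons, splitStep, h, ih, chunks]
    · rw [Bool.not_eq_true] at h
      simp [List.foldl_cons, splitStep, h, ih, chunks]

theorem restGroups_cons (l : String) (t : List String) (h : isFileLine l = true) :
    restGroups (l :: t) = (l :: t.takeWhile (fun x => !isFileLine x)) :: restGroups t := by
  rw [restGroups]
  simp [h, chunks_span t [l], restGroups]

theorem foldB (t : List String) :
    t.foldr altStep ([], [])
      = (restGroups t, t.takeWhile (fun l => !isFileLine l)) := by
  induction t with
  | nil => simp [restGroups]
  | cons l t ih =>
    by_cases h : isFileLine l = true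
    · simp [List.foldr_cons, altStep, ih, h, restGroups_cons l t h]
    · rw [Bool.not_eq_true] at h
      simp [List.foldr_cons, altStep, ih, h, restGroups]

-- startswith 'File "' implies line[:6] is exactly 'File "'
theorem slice6_of_starts (l : String) (h : isFileLine l = true) :
    PySem.Str.slice l none (some 6) = "File \"" := by
  unfold isFileLine at h
  rw [PySem.Str.startswith_eq, PySem.Chars.startswith_iff] at h
  obtain ⟨r, hr⟩ := h
  have hl : l.toList = "File \"".toList ++ r := hr.symm
  have h2 : (PySem.Str.slice l none (some 6)).toList = "File \"".toList := by
    rw [PySem.Str.toList_slice, PySem.Chars.slice_eq_listSlice, hl]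
    rw [show (6:Int) = ((6:Nat):Int) from rfl, PySem.List.slice_to_natCast]
    simp
  exact String.toList_inj.mp (by simpa using h2)

-- ===== VERDICT (by name: the statements are the Claim_ definitions above) =====
theorem split_errors_spec : Claim_unchanged_split_errors := by
  intro xs _ hpre
  unfold Spec_split_errors
  intro hnd
  match xs with
  | [] => exact absurd rfl hnd
  | x :: t =>
    have hx : isFileLine x = true := by
      simpa [Pre_split_errors] using hpre
    have hA : split_errors (x :: t) = chunks [x] t := by
      have h6 := slice6_of_starts x hx
      simp only [split_errors, List.foldl_cons, splitStep, hx, Bool.and_false,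
        h6, ne_eq, not_true_eq_false, Bool.not_false, if_true, if_false]
      simpa using foldA t [] [x]
    have hB : split_errors_alt (x :: t) = chunks [x] t := by
      simp only [split_errors_alt, hx, List.headI, not_true_eq_false, and_false,
        if_false, foldB]
      rw [restGroups_cons x t hx, chunks_span]
      simp
    rw [hA, hB]

theorem split_errors_changed : Claim_changed_split_errors := by
  unfold Claim_changed_split_errors; decide

theorem split_errors_tight : Claim_exact_split_errors := by
  intro xs _ _ hd
  subst hd
  decide
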